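-- pv_equiv track=rewrite | github.com/Coaxecva/COMP4030-Design-and-Analysis-of-Algorithms | Fall2017/hw-sol/hw1.py | two_group
-- ===== SOURCE A (Python) =====
-- def scale(A, B):
-- 	if sum(A)==sum(B):
-- 		return 0
-- 	elif sum(A) < sum(B):
-- 		return -1
-- 	else:
-- 		return 1
--
-- def two_group(L):
-- 	if len(L)==1:
-- 		return L[0]
-- 	if len(L)%2 == 0:
-- 		# even
-- 		first = L[0 : len(L)//2]
-- 		second = L[len(L)//2 : len(L)]
-- 		if scale(first, second) == -1:
-- 			# fake coin is in first
-- 			return two_group(first)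
-- 		else:
-- 			# fake coin is in second
-- 			return two_group(second)
-- 	else:
-- 		# odd
-- 		first = L[0 : len(L)//2]
-- 		second = L[len(L)//2 : len(L)-1]
-- 		last = L[-1]
-- 		if scale(first, second) == 0:
-- 			return last
-- 		if scale(first, second) == -1:
-- 			# fake coin is in first
-- 			return two_group(first)
-- 		else:
-- 			# fake coin is in second
-- 			return two_group(second)
-- ===== SOURCE B (Python) =====
-- def two_group(L):
--     while len(L) > 1:
--         n = len(L)
--         first = L[0 : n // 2]
--         if n % 2 == 0:
--             second = L[n // 2 : n]
--             L = first if sum(first) < sum(second) else second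
--         else:
--             second = L[n // 2 : n - 1]
--             if sum(first) == sum(second):
--                 return L[-1]
--             L = first if sum(first) < sum(second) else second
--     return L[0]
-- ===== Notes on version B (the rewrite author's own statement) =====
-- stated objective: simpler
-- what changed: Replaces A's recursion (plus a separate scale helper called up to twice per level, recomputing the group sums) with a single iterative while-loop that computes each half's sum once per level and reassigns the current list to the lighter half.
-- outside the precondition, e.g. on two_group([]): A raises RecursionError, B raises IndexError
import Mathlib
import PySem

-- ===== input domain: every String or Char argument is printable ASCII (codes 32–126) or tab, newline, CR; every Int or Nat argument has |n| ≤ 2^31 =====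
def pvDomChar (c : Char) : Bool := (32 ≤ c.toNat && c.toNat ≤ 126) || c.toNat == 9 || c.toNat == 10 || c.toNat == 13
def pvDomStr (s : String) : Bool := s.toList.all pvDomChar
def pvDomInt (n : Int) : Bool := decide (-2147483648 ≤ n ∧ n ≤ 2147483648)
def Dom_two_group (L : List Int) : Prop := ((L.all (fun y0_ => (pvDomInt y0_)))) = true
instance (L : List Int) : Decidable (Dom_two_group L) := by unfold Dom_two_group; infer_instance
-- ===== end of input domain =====

-- B replaces A's recursion (and its scale helper, called up to twice per level) by an
-- iterative while-loop that computes each half's sum once and keeps the lighter half.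
-- A raises (RecursionError) on the empty list; Pre_ excludes it.

-- ===== PORT A =====
-- helper `scale` from A's module
def pyScale (A B : List Int) : Int :=
  if A.sum == B.sum then 0
  else if A.sum < B.sum then -1
  else 1

-- fuel = L.length makes the recursion structural; on inputs satisfying Pre_ it never runs out
def two_groupFuel : Nat → List Int → Int
  | 0, L => (PySem.List.pyGet? L 0).getD 0
  | f + 1, L =>
    if L.length == 1 then (PySem.List.pyGet? L 0).getD 0
    else if L.length % 2 == 0 then
      let first := PySem.List.slice L (some 0) (some ((L.length / 2 : Nat) : Int));
      let second := PySem.List.slice L (some ((L.length / 2 : Nat) : Int)) (some ((L.length : Nat) : Int));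
      if pyScale first second == -1 then two_groupFuel f first
      else two_groupFuel f second
    else
      let first := PySem.List.slice L (some 0) (some ((L.length / 2 : Nat) : Int));
      let second := PySem.List.slice L (some ((L.length / 2 : Nat) : Int)) (some ((L.length - 1 : Nat) : Int));
      let last := (PySem.List.pyGet? L (-1)).getD 0;
      if pyScale first second == 0 then last
      else if pyScale first second == -1 then two_groupFuel f first
      else two_groupFuel f second

def two_group (L : List Int) : Int := two_groupFuel L.length L

-- ===== PORT B =====
-- the while-loop of Source B as a tail recursion on the loop variable L; fuel = initial length bounds the iterations
def two_groupLoop : Nat → List Int → Int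
  | 0, L => (PySem.List.pyGet? L 0).getD 0
  | f + 1, L =>
    if 1 < L.length then
      let first := PySem.List.slice L (some 0) (some ((L.length / 2 : Nat) : Int));
      if L.length % 2 == 0 then
        let second := PySem.List.slice L (some ((L.length / 2 : Nat) : Int)) (some ((L.length : Nat) : Int));
        two_groupLoop f (if first.sum < second.sum then first else second)
      else
        let second := PySem.List.slice L (some ((L.length / 2 : Nat) : Int)) (some ((L.length - 1 : Nat) : Int));
        if first.sum == second.sum then (PySem.List.pyGet? L (-1)).getD 0
        else two_groupLoop f (if first.sum < second.sum then first else second)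
    else (PySem.List.pyGet? L 0).getD 0

def two_group_alt (L : List Int) : Int := two_groupLoop L.length L

-- ===== PRECONDITION & SPEC =====
-- A recurses forever (RecursionError) on [] and B raises IndexError there; everything else is admitted.
def Pre_two_group (L : List Int) : Prop := L ≠ []
instance (L : List Int) : Decidable (Pre_two_group L) := by unfold Pre_two_group; infer_instance
def pvWitness_two_group : List Int := ([1, 1, 0, 1])

def Spec_two_group (L : List Int) (out : Int) : Prop := out = two_group_alt L
instance (L : List Int) (out : Int) : Decidable (Spec_two_group L out) := by unfold Spec_two_group; infer_instance

-- ===== CLAIM (what is proved, stated in full; the proofs are below) =====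
def Claim_equal_two_group : Prop := ∀ (L : List Int), Dom_two_group L → Pre_two_group L → Spec_two_group L (two_group L)

-- ===== LEMMAS AND PROOFS =====

theorem fuel_nil : ∀ (f : Nat), two_groupFuel f [] = 0 := by
  intro f
  induction f with
  | zero => rfl
  | succ f ih => simpa [two_groupFuel, pyScale, PySem.List.slice, PySem.List.pyGet?] using ih

theorem scale_even (X : List Int → Int) (a b : List Int) :
    (if pyScale a b == -1 then X a else X b) = X (if a.sum < b.sum then a else b) := by
  unfold pyScale
  split_ifs <;> simp_all

theorem scale_odd (X : List Int → Int) (c : Int) (a b : List Int) :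
    (if pyScale a b == 0 then c else if pyScale a b == -1 then X a else X b)
      = (if a.sum == b.sum then c else X (if a.sum < b.sum then a else b)) := by
  unfold pyScale
  split_ifs <;> simp_all

theorem fuel_eq_loop : ∀ (f : Nat) (L : List Int), two_groupFuel f L = two_groupLoop f L := by
  intro f
  induction f with
  | zero => intro L; rfl
  | succ f ih =>
    intro L
    by_cases h0 : L = []
    · subst h0
      simp [two_groupLoop, two_groupFuel, fuel_nil, pyScale, PySem.List.slice, PySem.List.pyGet?]
    · by_cases h1 : L.length = 1
      · simp [two_groupFuel, two_groupLoop, h1]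
      · have h2 : 1 < L.length := by
          have := List.length_pos_of_ne_nil h0; omega
        have hb1 : (L.length == 1) = false := by simp [h1]
        by_cases hev : L.length % 2 = 0
        · have hbe : (L.length % 2 == 0) = true := by simp [hev]
          simp only [two_groupFuel, two_groupLoop, hb1, hbe, Bool.false_eq_true, if_false,
            if_true, if_pos h2, ih]
          exact scale_even _ _ _
        · have hbe : (L.length % 2 == 0) = false := by simp [hev]
          simp only [two_groupFuel, two_groupLoop, hb1, hbe, Bool.false_eq_true, if_false,
            if_pos h2, ih]
          exact scale_odd _ _ _ _

-- ===== VERDICT (by name: the statement is the Claim_ definition above) =====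
theorem two_group_spec : Claim_equal_two_group := by
  intro L _ _
  unfold Spec_two_group two_group two_group_alt
  exact fuel_eq_loop L.length L
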